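-- pv_equiv track=rewrite | github.com/nesrv/EGE-2024 | Решу-ЕГЭ/20/яндекс-5/solution.py | f
-- ===== SOURCE A (Python) =====
-- def f(s, n, h):
--     if s >= 131 or n > 4:
--         return n == 4 or n == 2
--     if n == 0:
--         return f(s+2, n+1, "+2") and f(s+1, n+1, "+3") and f(s*2, n+1, "*2")
--     if n == 1 or n == 3:
--         if h == "+2":
--             return f(s+3, n+1, "+3") or f(s*2, n+1, "*2")
--         if h == "+3":
--             return f(s+2, n+1, "+2") or f(s*2, n+1, "*2")
--         if h == "*2":
--             return f(s+2, n+1, "+2") or f(s+3, n+1, "+3")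
--     if n == 2 or n == 4:
--         if h == "+2":
--             return f(s+3, n+1, "+3") and f(s*2, n+1, "*2")
--         if h == "+3":
--             return f(s+2, n+1, "+2") and f(s*2, n+1, "*2")
--         if h == "*2":
--             return f(s+2, n+1, "+2") and f(s+3, n+1, "+3")
-- ===== SOURCE B (Python) =====
-- def _expand(node):
--     cs, cn, ch = node
--     ms = [("+2", cs + 2), ("+3", cs + 3), ("*2", cs * 2)]
--     if cn != 0:
--         ms = [m for m in ms if m[0] != ch]
--     return [(v, cn + 1, lbl) for lbl, v in ms]
--
--
-- def _eval_layer(layer, vals):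
--     out = []
--     i = 0
--     for cs, cn, ch in layer:
--         k = 3 if cn == 0 else 2
--         if cs >= 131 or cn > 4:
--             out.append(cn == 2 or cn == 4)
--         else:
--             sub = vals[i:i + k]
--             out.append(any(sub) if cn % 2 == 1 else all(sub))
--         i += k
--     return out
--
--
-- def f(s, n, h):
--     # forward pass: materialise the full depth-5 move tree, layer by layer
--     layers = [[(s, n, h)]]
--     for _ in range(5):
--         layers.append([c for node in layers[-1] for c in _expand(node)])
--     # backward induction over the layers
--     vals = []
--     for layer in reversed(layers):
--         vals = _eval_layer(layer, vals)
--     return vals[0]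
-- ===== Notes on version B (the rewrite author's own statement) =====
-- stated objective: alternative
-- what changed: B replaces A's direct recursion by an explicit two-pass algorithm: a forward pass materialises the full depth-5 move tree layer by layer, then a backward-induction pass folds each layer's values from the leaves up with any/all chosen by depth parity; it also fixes A's root typo where the '+3'-labelled move computes s+1.
-- intended difference: At n=0 with s=64 (the only input where it changes the answer) A returns False because its root '+3' move mistakenly computes s+1 instead of s+3; B uses s+3, the move its label names, and returns True, which is the intended game value. — e.g. on f(64, 0, "+2"): A returns false, B returns true
-- outside the precondition, e.g. on f(0, 1, 'x'): A returns None, B returns False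
import Mathlib
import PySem

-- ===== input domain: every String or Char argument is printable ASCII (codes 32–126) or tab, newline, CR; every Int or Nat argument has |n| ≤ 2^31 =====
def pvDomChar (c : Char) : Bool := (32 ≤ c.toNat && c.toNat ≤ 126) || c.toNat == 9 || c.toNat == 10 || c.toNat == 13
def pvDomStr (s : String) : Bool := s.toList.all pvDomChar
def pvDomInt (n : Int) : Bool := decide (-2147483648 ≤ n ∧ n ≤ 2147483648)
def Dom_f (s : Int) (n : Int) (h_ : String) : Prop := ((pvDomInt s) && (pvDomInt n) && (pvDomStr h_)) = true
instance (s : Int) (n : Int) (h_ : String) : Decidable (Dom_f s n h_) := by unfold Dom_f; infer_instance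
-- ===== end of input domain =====

-- B replaces A's direct recursion by an explicit two-pass algorithm (forward layer-by-layer
-- tree build, then backward-induction fold over the layers) and fixes A's root '+3'-move
-- typo (s+1 → s+3), which changes the answer only at (s, n) = (64, 0) — stated as D_f below.
-- A's port uses a structural fuel counter (6 suffices: the recursion stops once n > 4)
-- purely as a totality guard; it never runs out on any input.

-- ===== PORT A =====
def fGo : Nat → Int → Int → String → Bool
  | 0, _, _, _ => false   -- unreachable: each call increments n and recursion stops at n > 4
  | fuel+1, s, n, h_ =>
    if 131 ≤ s ∨ 4 < n then (n == 4 || n == 2)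
    else if n = 0 then
      fGo fuel (s+2) (n+1) "+2" && fGo fuel (s+1) (n+1) "+3" && fGo fuel (s*2) (n+1) "*2"
    else if n = 1 ∨ n = 3 then
      if h_ = "+2" then fGo fuel (s+3) (n+1) "+3" || fGo fuel (s*2) (n+1) "*2"
      else if h_ = "+3" then fGo fuel (s+2) (n+1) "+2" || fGo fuel (s*2) (n+1) "*2"
      else if h_ = "*2" then fGo fuel (s+2) (n+1) "+2" || fGo fuel (s+3) (n+1) "+3"
      else false  -- Python falls through and returns None here; outside Pre_f
    else if n = 2 ∨ n = 4 then
      if h_ = "+2" then fGo fuel (s+3) (n+1) "+3" && fGo fuel (s*2) (n+1) "*2"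
      else if h_ = "+3" then fGo fuel (s+2) (n+1) "+2" && fGo fuel (s*2) (n+1) "*2"
      else if h_ = "*2" then fGo fuel (s+2) (n+1) "+2" && fGo fuel (s+3) (n+1) "+3"
      else false  -- Python returns None here; outside Pre_f
    else false    -- Python returns None here; outside Pre_f

def f (s : Int) (n : Int) (h_ : String) : Bool := fGo 6 s n h_

-- ===== PORT B =====
-- _expand: the children of one tree node (the full move table, filtered by the banned label)
def pvExpand (node : Int × Int × String) : List (Int × Int × String) :=
  let cs := node.1; let cn := node.2.1; let ch := node.2.2
  let ms : List (String × Int) := [("+2", cs + 2), ("+3", cs + 3), ("*2", cs * 2)]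
  let ms := if cn ≠ 0 then ms.filter (fun m => m.1 != ch) else ms
  ms.map (fun p => (p.2, cn + 1, p.1))

-- _eval_layer: one backward-induction step; the Python slice vals[i:i+k] with the running
-- offset i is ported as take k on the successively dropped tail (exact: i, k ≥ 0, i advances by k)
def pvEvalLayer : List (Int × Int × String) → List Bool → List Bool
  | [], _ => []
  | (cs, cn, _ch) :: rest, vals =>
    let k : Nat := if cn = 0 then 3 else 2
    let v := if 131 ≤ cs ∨ 4 < cn then (cn == 2 || cn == 4)
             else (let sub := vals.take k
                   if cn % 2 = 1 then sub.any id else sub.all id)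
    v :: pvEvalLayer rest (vals.drop k)

-- the two fixed-count loops (range(5) forward, reversed(layers) backward) are unrolled;
-- vals[0] is ported as headD false (the root layer has one node, so the list is a singleton)
def f_alt (s : Int) (n : Int) (h_ : String) : Bool :=
  let l0 : List (Int × Int × String) := [(s, n, h_)]
  let l1 := l0.flatMap pvExpand
  let l2 := l1.flatMap pvExpand
  let l3 := l2.flatMap pvExpand
  let l4 := l3.flatMap pvExpand
  let l5 := l4.flatMap pvExpand
  let v5 := pvEvalLayer l5 []
  let v4 := pvEvalLayer l4 v5
  let v3 := pvEvalLayer l3 v4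
  let v2 := pvEvalLayer l2 v3
  let v1 := pvEvalLayer l1 v2
  (pvEvalLayer l0 v1).headD false

-- ===== PRECONDITION & SPEC =====
-- Pre_f excludes exactly the inputs (s < 131 with n < 0, or 1 ≤ n ≤ 4 and a history label
-- other than "+2"/"+3"/"*2") on which Python A falls through all branches and returns None,
-- which is not a bool.
def Pre_f (s : Int) (n : Int) (h_ : String) : Prop :=
  131 ≤ s ∨ 4 < n ∨ n = 0 ∨ ((1 ≤ n ∧ n ≤ 4) ∧ (h_ = "+2" ∨ h_ = "+3" ∨ h_ = "*2"))
instance (s : Int) (n : Int) (h_ : String) : Decidable (Pre_f s n h_) := by unfold Pre_f; infer_instance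
def pvWitness_f : Int × Int × String := (0, 0, "+2")

-- At n=0 with s=64 (the only input where it changes the answer) A returns False because its
-- root "+3" move mistakenly computes s+1 instead of s+3; B uses s+3, the move its label
-- names, and returns True, the intended game value.
def D_f (s : Int) (n : Int) (h_ : String) : Prop := n = 0 ∧ s = 64
instance (s : Int) (n : Int) (h_ : String) : Decidable (D_f s n h_) := by unfold D_f; infer_instance

def Spec_f (s : Int) (n : Int) (h_ : String) (out : Bool) : Prop := ¬ D_f s n h_ → out = f_alt s n h_
instance (s : Int) (n : Int) (h_ : String) (out : Bool) : Decidable (Spec_f s n h_ out) := by unfold Spec_f; infer_instance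

def pvDiffWitness_f : Int × Int × String := (64, 0, "+2")
def pvDiffWitnessOut_f : Bool × Bool := (false, true)

-- ===== CLAIM (what is proved, stated in full; the proofs are below) =====
def Claim_unchanged_f : Prop := ∀ (s : Int) (n : Int) (h_ : String), Dom_f s n h_ → Pre_f s n h_ → Spec_f s n h_ (f s n h_)
def Claim_changed_f : Prop := Dom_f (pvDiffWitness_f.1) (pvDiffWitness_f.2.1) (pvDiffWitness_f.2.2) ∧ Pre_f (pvDiffWitness_f.1) (pvDiffWitness_f.2.1) (pvDiffWitness_f.2.2) ∧ D_f (pvDiffWitness_f.1) (pvDiffWitness_f.2.1) (pvDiffWitness_f.2.2) ∧ f (pvDiffWitness_f.1) (pvDiffWitness_f.2.1) (pvDiffWitness_f.2.2) = pvDiffWitnessOut_f.1 ∧ f_alt (pvDiffWitness_f.1) (pvDiffWitness_f.2.1) (pvDiffWitness_f.2.2) = pvDiffWitnessOut_f.2 ∧ pvDiffWitnessOut_f.1 ≠ pvDiffWitnessOut_f.2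
def Claim_exact_f : Prop := ∀ (s : Int) (n : Int) (h_ : String), Dom_f s n h_ → Pre_f s n h_ → D_f s n h_ → f s n h_ ≠ f_alt s n h_

-- ===== LEMMAS AND PROOFS =====

-- a terminal root node evaluates without looking at the lower layers' values
lemma evalLayer_leaf (s n : Int) (h_ : String) (vals : List Bool) (hb : 131 ≤ s ∨ 4 < n) :
    pvEvalLayer [(s, n, h_)] vals = [(n == 2 || n == 4)] := by
  simp [pvEvalLayer, hb]

lemma falt_leaf (s n : Int) (h_ : String) (hb : 131 ≤ s ∨ 4 < n) :
    f_alt s n h_ = (n == 2 || n == 4) := by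
  simp only [f_alt]
  rw [evalLayer_leaf _ _ _ _ hb]
  rfl

lemma fA_at64 (h_ : String) : f 64 0 h_ = false := rfl

lemma fB_at64 (h_ : String) : f_alt 64 0 h_ = true := rfl

-- ===== VERDICT (by name: the statements are the Claim_ definitions above) =====
set_option maxHeartbeats 4000000 in
theorem f_spec : Claim_unchanged_f := by
  intro s n h_ _ hpre hD
  show f s n h_ = f_alt s n h_
  by_cases hb : 131 ≤ s ∨ 4 < n
  · rw [falt_leaf _ _ _ hb]
    show fGo 6 s n h_ = _
    rw [fGo]; simp [hb, Bool.or_comm]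
  · rcases hpre with h | h | h | ⟨⟨h1, h4⟩, hv⟩
    · exact absurd (Or.inl h) hb
    · exact absurd (Or.inr h) hb
    · subst h
      have hne : s ≠ 64 := fun hc => hD ⟨rfl, hc⟩
      show fGo 6 s 0 h_ = f_alt s 0 h_
      simp [fGo, f_alt, pvExpand, pvEvalLayer]
      rw [Bool.eq_iff_iff]
      simp only [Bool.and_eq_true, Bool.or_eq_true, Bool.not_eq_true',
        decide_eq_true_eq, decide_eq_false_iff_not]
      omega
    · have hn : n = 1 ∨ n = 2 ∨ n = 3 ∨ n = 4 := by omega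
      rcases hn with rfl | rfl | rfl | rfl <;> rcases hv with rfl | rfl | rfl <;>
        · show fGo 6 _ _ _ = f_alt _ _ _
          simp [fGo, f_alt, pvExpand, pvEvalLayer]

theorem f_changed : Claim_changed_f := by
  unfold Claim_changed_f
  exact ⟨by decide, by decide, by decide, by decide, by decide, by decide⟩

theorem f_tight : Claim_exact_f := by
  intro s n h_ _ _ hD
  obtain ⟨rfl, rfl⟩ := hD
  rw [fA_at64, fB_at64]
  simp
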